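-- pv_equiv track=rewrite | github.com/lli259/test_diff | performance_gen.py | hardness_for_instance
-- ===== SOURCE A (Python) =====
-- def hardness_for_instance(l):
--     #['hard','easy','timeout']
--     hard=easy=timeout=0
--     for i in l:
--         if i=='hard':
--             hard+=1
--         if i=='easy':
--             easy+=1
--         if i=='timeout':
--             timeout+=1
--     if hard> 0:
--         return 'hard'
--     if timeout== len(l):
--         return 'timeout'
--     if easy== len(l):
--         return 'easy'
--     return 'hard'
-- ===== SOURCE B (Python) =====
-- def hardness_for_instance(l):
--     if 'hard' in l:
--         return 'hard'
--     if all(x == 'timeout' for x in l):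
--         return 'timeout'
--     if all(x == 'easy' for x in l):
--         return 'easy'
--     return 'hard'
-- ===== Notes on version B (the rewrite author's own statement) =====
-- stated objective: simpler
-- what changed: Replaced the three-counter single pass plus count comparisons by early-return membership and all() checks in the same priority order.
import Mathlib
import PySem

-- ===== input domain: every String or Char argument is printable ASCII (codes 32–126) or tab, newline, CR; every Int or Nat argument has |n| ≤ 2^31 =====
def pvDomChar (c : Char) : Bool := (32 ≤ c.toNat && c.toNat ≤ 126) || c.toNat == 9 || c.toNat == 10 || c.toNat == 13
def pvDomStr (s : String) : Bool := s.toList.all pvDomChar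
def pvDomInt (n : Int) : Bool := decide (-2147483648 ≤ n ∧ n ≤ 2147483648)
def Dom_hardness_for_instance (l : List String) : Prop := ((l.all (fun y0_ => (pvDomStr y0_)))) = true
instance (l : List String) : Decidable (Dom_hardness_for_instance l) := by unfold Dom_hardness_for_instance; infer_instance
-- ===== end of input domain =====

-- B replaces A's three-counter pass by early-return membership/all checks in the same priority order (simpler).


-- ===== PORT A =====
-- counters (hard, easy, timeout) threaded through a fold, then the branch chain, as in A
def hardness_for_instance (l : List String) : String :=
  let c := l.foldl (fun (s : Int × Int × Int) i =>
    let s := if i = "hard" then (s.1 + 1, s.2.1, s.2.2) else s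
    let s := if i = "easy" then (s.1, s.2.1 + 1, s.2.2) else s
    if i = "timeout" then (s.1, s.2.1, s.2.2 + 1) else s) (0, 0, 0)
  if c.1 > 0 then "hard"
  else if c.2.2 = (l.length : Int) then "timeout"
  else if c.2.1 = (l.length : Int) then "easy"
  else "hard"

-- ===== PORT B =====
def hardness_for_instance_alt (l : List String) : String :=
  if l.contains "hard" then "hard"
  else if l.all (fun x => x == "timeout") then "timeout"
  else if l.all (fun x => x == "easy") then "easy"
  else "hard"

-- ===== PRECONDITION & SPEC =====
def Spec_hardness_for_instance (l : List String) (out : String) : Prop := out = hardness_for_instance_alt l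
instance (l : List String) (out : String) : Decidable (Spec_hardness_for_instance l out) := by unfold Spec_hardness_for_instance; infer_instance

-- ===== CLAIM (what is proved, stated in full; the proofs are below) =====
def Claim_equal_hardness_for_instance : Prop := ∀ (l : List String), Dom_hardness_for_instance l → Spec_hardness_for_instance l (hardness_for_instance l)

-- ===== LEMMAS AND PROOFS =====

-- the fold computes the three counts shifted by the initial state
theorem pv_fold_counts (l : List String) (h e t : Int) :
    l.foldl (fun (s : Int × Int × Int) i =>
      let s := if i = "hard" then (s.1 + 1, s.2.1, s.2.2) else s
      let s := if i = "easy" then (s.1, s.2.1 + 1, s.2.2) else s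
      if i = "timeout" then (s.1, s.2.1, s.2.2 + 1) else s) (h, e, t)
    = (h + l.count "hard", e + l.count "easy", t + l.count "timeout") := by
  induction l generalizing h e t with
  | nil => simp
  | cons x xs ih =>
    simp only [List.foldl_cons, List.count_cons]
    by_cases hx : x = "hard" <;> by_cases ex : x = "easy" <;> by_cases tx : x = "timeout" <;>
      simp_all [Prod.ext_iff] <;> omega

theorem pv_count_pos (l : List String) : ((0:Int) < (l.count "hard" : Int)) ↔ l.contains "hard" := by
  simp [List.count_pos_iff]

theorem pv_count_len (l : List String) (a : String) :
    ((l.count a : Int) = (l.length : Int)) ↔ l.all (fun x => x == a) := by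
  rw [Int.natCast_inj]
  constructor
  · intro h
    simp only [List.all_eq_true, beq_iff_eq]
    intro x hx
    exact ((List.count_eq_length).mp h x hx).symm
  · intro h
    refine List.count_eq_length.mpr (fun b hb => ?_)
    have hb2 := (List.all_eq_true.mp h) b hb
    exact (beq_iff_eq.mp hb2).symm

-- ===== VERDICT (by name: the statement is the Claim_ definition above) =====
theorem hardness_for_instance_spec : Claim_equal_hardness_for_instance := by
  intro l _
  unfold Spec_hardness_for_instance hardness_for_instance hardness_for_instance_alt
  rw [show ((0:Int),(0:Int),(0:Int)) = ((0:Int),((0:Int),(0:Int))) from rfl]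
  rw [pv_fold_counts]
  simp only [zero_add]
  by_cases h1 : l.contains "hard"
  · rw [if_pos h1, if_pos (by rw [gt_iff_lt, pv_count_pos]; exact h1)]
  · rw [if_neg h1, if_neg (by rw [gt_iff_lt, pv_count_pos]; exact fun h => h1 (by simpa using h))]
    by_cases h2 : l.all (fun x => x == "timeout")
    · rw [if_pos h2, if_pos ((pv_count_len l "timeout").mpr h2)]
    · rw [if_neg h2, if_neg (fun h => h2 ((pv_count_len l "timeout").mp h))]
      by_cases h3 : l.all (fun x => x == "easy")
      · rw [if_pos h3, if_pos ((pv_count_len l "easy").mpr h3)]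
      · rw [if_neg h3, if_neg (fun h => h3 ((pv_count_len l "easy").mp h))]
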